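-- pv_equiv track=rewrite | github.com/mcimpoi/advent_of_code | 2024/day_16.py | get_cost
-- ===== SOURCE A (Python) =====
-- def dot_product(vec21, vec22):
--     return vec21[0] * vec22[0] + vec21[1] * vec22[1]
--
-- def get_cost(path):
--     cost = 0
--     my_dir = (0, 1)
--     for i in range(len(path) - 1):
--         r1, c1 = path[i]
--         r2, c2 = path[i + 1]
--         direction = (r2 - r1, c2 - c1)
--         if dot_product(my_dir, direction) == 0:
--             cost += 1001
--         else:
--             cost += 1
--         my_dir = direction
--     return cost, len(path)
-- ===== SOURCE B (Python) =====
-- def get_cost(path):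
--     def solve(lo, hi, din):
--         # cost and outgoing direction for the segments between path[lo] and path[hi]
--         if hi - lo < 1:
--             return 0, din
--         if hi - lo == 1:
--             a, b = path[lo], path[hi]
--             d = (b[0] - a[0], b[1] - a[1])
--             return (1001 if din[0] * d[0] + din[1] * d[1] == 0 else 1), d
--         mid = (lo + hi) // 2
--         c1, d1 = solve(lo, mid, din)
--         c2, d2 = solve(mid, hi, d1)
--         return c1 + c2, d2
--
--     cost, _ = solve(0, len(path) - 1, (0, 1))
--     return cost, len(path)
-- ===== Notes on version B (the rewrite author's own statement) =====
-- stated objective: alternative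
-- what changed: B replaces A's left-to-right accumulating loop with a divide-and-conquer recursion over index ranges: each half is solved independently as (cost, outgoing direction) and the halves are combined at the midpoint, instead of carrying a single (cost, my_dir) state through one pass.
import Mathlib
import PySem

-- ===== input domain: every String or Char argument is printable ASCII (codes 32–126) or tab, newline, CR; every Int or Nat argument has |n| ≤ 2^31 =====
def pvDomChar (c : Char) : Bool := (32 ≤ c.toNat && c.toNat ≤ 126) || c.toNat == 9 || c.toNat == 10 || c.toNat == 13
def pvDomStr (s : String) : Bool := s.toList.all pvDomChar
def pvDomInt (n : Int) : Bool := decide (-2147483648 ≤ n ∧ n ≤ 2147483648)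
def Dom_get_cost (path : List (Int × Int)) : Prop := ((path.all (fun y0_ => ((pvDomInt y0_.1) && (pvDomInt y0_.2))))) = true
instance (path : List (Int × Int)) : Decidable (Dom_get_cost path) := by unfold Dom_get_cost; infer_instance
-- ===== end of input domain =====

-- B replaces A's single accumulating left-to-right loop by a divide-and-conquer recursion
-- over index ranges (each half returns (cost, outgoing direction), combined at the midpoint);
-- objective: alternative decomposition, same asymptotic cost.


-- ===== PORT A =====
-- A's loop over i in range(len-1) reads path[i], path[i+1]: ported as the structural
-- recursion over consecutive pairs carrying the same (cost, my_dir) state.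
def dot_product (v1 v2 : Int × Int) : Int := v1.1 * v2.1 + v1.2 * v2.2

def get_cost_loop (my_dir : Int × Int) (cost : Int) : List (Int × Int) → Int
  | a :: b :: rest =>
      let direction : Int × Int := (b.1 - a.1, b.2 - a.2)
      let cost' := if dot_product my_dir direction = 0 then cost + 1001 else cost + 1
      get_cost_loop direction cost' (b :: rest)
  | _ => cost

def get_cost (path : List (Int × Int)) : Int × Int :=
  (get_cost_loop (0, 1) 0 path, (path.length : Int))

-- ===== PORT B =====
-- Source B's inner 'solve(lo, hi, din)': divide and conquer on the index range [lo, hi];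
-- path[lo]/path[hi] is PySem.List.pyGet? (indices are in range whenever read, so getD's
-- default is never returned), (lo + hi) // 2 is PySem.Int.floordiv.
def get_cost_solve (path : List (Int × Int)) :
    Nat → Int → Int → (Int × Int) → Int × (Int × Int)
  | 0, _, _, din => (0, din)    -- fuel guard only: never reached while hi - lo ≥ 1
  | fuel + 1, lo, hi, din =>
    if hi - lo < 1 then (0, din)
    else if hi - lo = 1 then
      let a := (PySem.List.pyGet? path lo).getD (0, 0)
      let b := (PySem.List.pyGet? path hi).getD (0, 0)
      let d : Int × Int := (b.1 - a.1, b.2 - a.2)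
      ((if din.1 * d.1 + din.2 * d.2 = 0 then 1001 else 1), d)
    else
      let mid := PySem.Int.floordiv (lo + hi) 2
      let r1 := get_cost_solve path fuel lo mid din
      let r2 := get_cost_solve path fuel mid hi r1.2
      (r1.1 + r2.1, r2.2)

def get_cost_alt (path : List (Int × Int)) : Int × Int :=
  let r := get_cost_solve path ((path.length : Int) - 1).toNat 0 ((path.length : Int) - 1) (0, 1)
  (r.1, (path.length : Int))

-- ===== PRECONDITION & SPEC =====
def Spec_get_cost (path : List (Int × Int)) (out : Int × Int) : Prop := out = get_cost_alt path
instance (path : List (Int × Int)) (out : Int × Int) : Decidable (Spec_get_cost path out) := by unfold Spec_get_cost; infer_instance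

-- ===== CLAIM (what is proved, stated in full; the proofs are below) =====
def Claim_equal_get_cost : Prop := ∀ (path : List (Int × Int)), Dom_get_cost path → Spec_get_cost path (get_cost path)

-- ===== LEMMAS AND PROOFS =====

-- the list of consecutive direction vectors, structurally
def pvDirs : List (Int × Int) → List (Int × Int)
  | a :: b :: r => (b.1 - a.1, b.2 - a.2) :: pvDirs (b :: r)
  | _ => []

-- the linear left-to-right evaluation: cost and outgoing direction of a direction list
def pvLin (din : Int × Int) : List (Int × Int) → Int × (Int × Int)
  | [] => (0, din)
  | d :: D =>
      let c : Int := if din.1 * d.1 + din.2 * d.2 = 0 then 1001 else 1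
      let r := pvLin d D
      (c + r.1, r.2)

-- direction of segment i, by absolute index
def pvDir (path : List (Int × Int)) (i : Nat) : Int × Int :=
  let a := path.getD i (0, 0)
  let b := path.getD (i + 1) (0, 0)
  (b.1 - a.1, b.2 - a.2)

-- the direction list of the range [lo, hi], by absolute indices
def pvSeg (path : List (Int × Int)) (lo hi : Int) : List (Int × Int) :=
  (List.range' lo.toNat (hi - lo).toNat).map (pvDir path)

theorem pvLin_append (D1 D2 : List (Int × Int)) : ∀ din,
    pvLin din (D1 ++ D2) =
      ((pvLin din D1).1 + (pvLin (pvLin din D1).2 D2).1, (pvLin (pvLin din D1).2 D2).2) := by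
  induction D1 with
  | nil => intro din; simp [pvLin]
  | cons d D ih => intro din; simp [pvLin, ih d]; ring

theorem get_cost_loop_lin (path : List (Int × Int)) : ∀ din c,
    get_cost_loop din c path = c + (pvLin din (pvDirs path)).1 := by
  induction path with
  | nil => intro din c; simp [get_cost_loop, pvDirs, pvLin]
  | cons a r ih =>
    cases r with
    | nil => intro din c; simp [get_cost_loop, pvDirs, pvLin]
    | cons b t =>
      intro din c
      simp only [get_cost_loop, pvDirs, pvLin, dot_product]
      rw [ih]
      split_ifs <;> ring

theorem pvSeg_split (path : List (Int × Int)) (lo mid hi : Int)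
    (h0 : 0 ≤ lo) (h1 : lo ≤ mid) (h2 : mid ≤ hi) :
    pvSeg path lo hi = pvSeg path lo mid ++ pvSeg path mid hi := by
  unfold pvSeg
  rw [← List.map_append]
  have e1 : (hi - lo).toNat = (mid - lo).toNat + (hi - mid).toNat := by omega
  have e2 : lo.toNat + (mid - lo).toNat = mid.toNat := by omega
  rw [e1, ← List.range'_append_1, e2]

theorem solve_eq_lin (path : List (Int × Int)) : ∀ fuel lo hi din,
    (hi - lo).toNat ≤ fuel → 0 ≤ lo →
    get_cost_solve path fuel lo hi din = pvLin din (pvSeg path lo hi) := by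
  intro fuel
  induction fuel with
  | zero =>
    intro lo hi din hn hlo
    have : (hi - lo).toNat = 0 := by omega
    simp [get_cost_solve, pvSeg, this, pvLin]
  | succ fuel ih =>
    intro lo hi din hn hlo
    rw [get_cost_solve]
    by_cases h1 : hi - lo < 1
    · have : (hi - lo).toNat = 0 := by omega
      simp [h1, pvSeg, this, pvLin]
    · by_cases h2 : hi - lo = 1
      · have hone : (hi - lo).toNat = 1 := by omega
        have hhi : hi = lo + 1 := by omega
        have hlo' : ((lo.toNat : Int)) = lo := by omega
        have g1 : PySem.List.pyGet? path lo = path[lo.toNat]? := by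
          rw [← hlo']; exact PySem.List.pyGet?_natCast path lo.toNat
        have g2 : PySem.List.pyGet? path hi = path[lo.toNat + 1]? := by
          have : hi = ((lo.toNat + 1 : Nat) : Int) := by omega
          rw [this]; exact PySem.List.pyGet?_natCast path (lo.toNat + 1)
        rw [if_neg h1, if_pos h2]
        simp [pvSeg, hone, List.range'_one, pvLin, pvDir, g1, g2, List.getD_eq_getElem?_getD]
      · have hge : 2 ≤ hi - lo := by omega
        simp only [h1, if_false, h2, if_false]
        have hmid : PySem.Int.floordiv (lo + hi) 2 = (lo + hi) / 2 :=
          PySem.Int.floordiv_eq_ediv_of_pos (by norm_num)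
        have hb1 : lo < PySem.Int.floordiv (lo + hi) 2 := by rw [hmid]; omega
        have hb2 : PySem.Int.floordiv (lo + hi) 2 < hi := by rw [hmid]; omega
        have s1 : get_cost_solve path fuel lo (PySem.Int.floordiv (lo + hi) 2) din =
            pvLin din (pvSeg path lo (PySem.Int.floordiv (lo + hi) 2)) :=
          ih lo _ din (by omega) hlo
        have s2 : ∀ d, get_cost_solve path fuel (PySem.Int.floordiv (lo + hi) 2) hi d =
            pvLin d (pvSeg path (PySem.Int.floordiv (lo + hi) 2) hi) :=
          fun d => ih _ hi d (by omega) (by omega)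
        rw [pvSeg_split path lo (PySem.Int.floordiv (lo + hi) 2) hi hlo (by omega) (by omega),
          pvLin_append, s1, s2]

theorem pvDirs_length : ∀ (p : List (Int × Int)), (pvDirs p).length = p.length - 1 := by
  intro p
  induction p with
  | nil => simp [pvDirs]
  | cons a r ih =>
    cases r with
    | nil => simp [pvDirs]
    | cons b t => simpa [pvDirs] using ih

theorem pvDirs_get : ∀ (p : List (Int × Int)) (i : Nat) (h : i < (pvDirs p).length),
    (pvDirs p)[i] = pvDir p i := by
  intro p
  induction p with
  | nil => intro i h; simp [pvDirs] at h
  | cons a r ih =>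
    cases r with
    | nil => intro i h; simp [pvDirs] at h
    | cons b t =>
      intro i h
      cases i with
      | zero => simp [pvDirs, pvDir]
      | succ j =>
        have h' : j < (pvDirs (b :: t)).length := by simpa [pvDirs] using h
        have := ih j h'
        simpa [pvDirs, pvDir, List.getD] using this

theorem pvSeg_full (path : List (Int × Int)) :
    pvSeg path 0 ((path.length : Int) - 1) = pvDirs path := by
  apply List.ext_getElem
  · simp [pvSeg, pvDirs_length]
  · intro i h1 h2
    rw [pvDirs_get path i h2]
    simp [pvSeg, List.range'_eq_map_range]

theorem get_cost_eq_alt (path : List (Int × Int)) : get_cost path = get_cost_alt path := by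
  unfold get_cost get_cost_alt
  rw [solve_eq_lin path ((path.length : Int) - 1).toNat 0 ((path.length : Int) - 1) (0, 1)
    (by omega) le_rfl, pvSeg_full, get_cost_loop_lin]
  simp

-- ===== VERDICT (by name: the statement is the Claim_ definition above) =====
theorem get_cost_spec : Claim_equal_get_cost := by
  intro path _
  exact get_cost_eq_alt path
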